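-- pv_equiv track=rewrite | github.com/tinkler-9/learning-python | t1/day11.py | denis_sum
-- ===== SOURCE A (Python) =====
-- def denis_sum(x):
--     """
--     """
--     y=None
--     for e in x:
--         if y is None:
--             y = e
--         else:
--             y=y+e
--     return y
-- ===== SOURCE B (Python) =====
-- def denis_sum(x):
--     xs = list(x)
--     if not xs:
--         return None
--
--     def rec(lo, hi):
--         # divide and conquer: combine halves with +
--         if hi - lo == 1:
--             return xs[lo]
--         mid = (lo + hi) // 2
--         return rec(lo, mid) + rec(mid, hi)
--
--     return rec(0, len(xs))
-- ===== Notes on version B (the rewrite author's own statement) =====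
-- stated objective: alternative
-- what changed: Replaces A's left-to-right sentinel accumulation loop with a recursive divide-and-conquer that splits the list in half and combines the half-sums with +; correct for ints because + is associative.
import Mathlib
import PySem

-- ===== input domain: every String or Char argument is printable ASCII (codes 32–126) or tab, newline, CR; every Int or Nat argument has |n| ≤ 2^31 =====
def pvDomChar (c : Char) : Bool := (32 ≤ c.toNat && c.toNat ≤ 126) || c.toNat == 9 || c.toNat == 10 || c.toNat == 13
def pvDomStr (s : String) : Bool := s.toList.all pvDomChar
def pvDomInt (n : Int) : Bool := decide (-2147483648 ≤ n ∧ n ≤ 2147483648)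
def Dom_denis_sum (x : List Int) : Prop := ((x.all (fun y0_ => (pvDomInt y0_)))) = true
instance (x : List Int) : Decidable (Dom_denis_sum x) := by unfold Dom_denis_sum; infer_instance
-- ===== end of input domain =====

-- B replaces A's left-to-right sentinel loop with a recursive divide-and-conquer half-split sum (alternative decomposition, same cost).


-- ===== PORT A =====
-- A: y = None; for e in x: y = e if y is None else y + e; return y
def denis_sum (x : List Int) : Option Int :=
  x.foldl (fun y e => match y with
    | none => some e
    | some v => some (v + e)) none

-- ===== PORT B =====
-- B's rec(lo, hi) over xs, represented as recursion on the sublist xs[lo:hi]: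
-- a single element returns itself, otherwise split at the midpoint and add the halves.
def dsRec (l : List Int) : Int :=
  if h : l.length ≤ 1 then l.headD 0   -- h: reached only with length = 1 (the guard in denis_sum_alt excludes [])
  else dsRec (l.take (l.length / 2)) + dsRec (l.drop (l.length / 2))
termination_by l.length
decreasing_by
  · simp only [List.length_take]; omega
  · simp only [List.length_drop]; omega

-- B: if not xs: return None; return rec(0, len(xs))
def denis_sum_alt (x : List Int) : Option Int :=
  match x with
  | [] => none
  | _ => some (dsRec x)

-- ===== PRECONDITION & SPEC =====
def Spec_denis_sum (x : List Int) (out : Option Int) : Prop := out = denis_sum_alt x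
instance (x : List Int) (out : Option Int) : Decidable (Spec_denis_sum x out) := by unfold Spec_denis_sum; infer_instance

-- ===== CLAIM (what is proved, stated in full; the proofs are below) =====
def Claim_equal_denis_sum : Prop := ∀ (x : List Int), Dom_denis_sum x → Spec_denis_sum x (denis_sum x)

-- ===== LEMMAS AND PROOFS =====
theorem dsRec_eq_sum (l : List Int) : dsRec l = l.sum := by
  induction l using dsRec.induct with
  | case1 l h =>
    rw [dsRec]
    simp only [dif_pos h]
    match l, h with
    | [], _ => simp
    | [a], _ => simp
  | case2 l h ih1 ih2 =>
    rw [dsRec]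
    simp only [dif_neg h]
    rw [ih1, ih2, ← List.sum_append, List.take_append_drop]

theorem denis_sum_foldl_some (l : List Int) (v : Int) :
    l.foldl (fun y e => match y with
      | none => some e
      | some v => some (v + e)) (some v) = some (v + l.sum) := by
  induction l generalizing v with
  | nil => simp
  | cons a t ih => simp [List.foldl, ih, add_assoc]

-- ===== VERDICT (by name: the statement is the Claim_ definition above) =====
theorem denis_sum_spec : Claim_equal_denis_sum := by
  intro x _
  unfold Spec_denis_sum denis_sum denis_sum_alt
  cases x with
  | nil => rfl
  | cons a t =>
    simp [List.foldl, denis_sum_foldl_some, dsRec_eq_sum]
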